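-- pv_equiv track=rewrite | github.com/iam57ao/DNUI-Python-2022 | 题目集/121-140/7-128.py | longWord
-- ===== SOURCE A (Python) =====
-- def longWord(input_str):
--     for element in input_str:
--         if not element.isalnum():
--             input_str = input_str.replace(element, " ")
--     word_list = input_str.split()
--     longest_index = 0
--     for word in word_list:
--         if len(word) > len(word_list[longest_index]):
--             longest_index = word_list.index(word)
--     return word_list[longest_index]
-- ===== SOURCE B (Python) =====
-- def longWord(input_str):
--     cleaned = "".join(c if c.isalnum() else " " for c in input_str)
--     word_list = cleaned.split()
--     return sorted(word_list, key=len, reverse=True)[0]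
-- ===== Notes on version B (the rewrite author's own statement) =====
-- stated objective: simpler
-- what changed: B cleans with a single character-wise comprehension instead of repeated whole-string replace() calls, and picks the longest word as the head of a stable length-descending sort instead of A's index-tracking loop with list.index rescans.
import Mathlib
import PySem

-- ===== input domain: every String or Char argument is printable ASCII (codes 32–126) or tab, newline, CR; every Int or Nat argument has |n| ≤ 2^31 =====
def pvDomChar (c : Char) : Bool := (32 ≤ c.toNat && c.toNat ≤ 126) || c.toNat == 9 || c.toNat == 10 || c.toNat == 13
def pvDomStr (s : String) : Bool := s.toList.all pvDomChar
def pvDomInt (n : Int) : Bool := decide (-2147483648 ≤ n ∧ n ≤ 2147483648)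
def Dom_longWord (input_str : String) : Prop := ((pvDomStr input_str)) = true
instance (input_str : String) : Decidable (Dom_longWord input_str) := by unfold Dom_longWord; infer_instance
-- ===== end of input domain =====

-- B replaces A's repeated whole-string replace() calls by one character-wise cleaning pass and A's
-- index-tracking longest-word loop (with list.index rescans) by the head of a stable length-descending sort.

-- ===== PORT A =====
def longWord (input_str : String) : String :=
  let s := input_str.toList
  -- for element in input_str: if not element.isalnum(): input_str = input_str.replace(element, " ")
  let cleaned := s.foldl (fun acc c =>
    if !(PySem.Chars.isalnum c) then PySem.Chars.replace acc [c] [' '] else acc) s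
  let wl := PySem.Chars.split₀ cleaned
  let li := wl.foldl (fun (li : Nat) w =>
    if w.length > (PySem.List.pyGetD wl (li : Int) []).length
    then (PySem.List.index? wl w).getD li else li) 0
  -- word_list[longest_index]; Python raises IndexError here iff wl = [] (excluded by Pre_)
  String.mk (PySem.List.pyGetD wl (li : Int) [])

-- ===== PORT B =====
def longWord_alt (input_str : String) : String :=
  let cleaned := input_str.toList.map (fun c => if PySem.Chars.isalnum c then c else ' ')
  let wl := PySem.Chars.split₀ cleaned
  -- sorted(word_list, key=len, reverse=True)[0]; Python raises IndexError iff wl = [] (excluded by Pre_)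
  String.mk ((PySem.List.sorted wl (fun w => w.length) true).headD [])

-- ===== PRECONDITION & SPEC =====
-- Pre_ excludes exactly the inputs with no alphanumeric character: there both A and B raise
-- IndexError (the cleaned string splits into no words).
def Pre_longWord (input_str : String) : Prop := input_str.toList.any PySem.Chars.isalnum = true
instance (input_str : String) : Decidable (Pre_longWord input_str) := by unfold Pre_longWord; infer_instance
def pvWitness_longWord : String := "ab cde f"

def Spec_longWord (input_str : String) (out : String) : Prop := out = longWord_alt input_str
instance (input_str : String) (out : String) : Decidable (Spec_longWord input_str out) := by unfold Spec_longWord; infer_instance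

-- ===== CLAIM (what is proved, stated in full; the proofs are below) =====
def Claim_equal_longWord : Prop := ∀ (input_str : String), Dom_longWord input_str → Pre_longWord input_str → Spec_longWord input_str (longWord input_str)

-- ===== LEMMAS AND PROOFS =====

-- the character-wise cleaning map both programs compute
def pvClean (c : Char) : Char := if PySem.Chars.isalnum c then c else ' '

-- single-character replace is a map
lemma replace_go_single (c e : Char) : ∀ fuel l acc, l.length ≤ fuel →
    PySem.Chars.replace.go [c] [e] fuel l acc
      = acc.reverse ++ l.map (fun d => if d = c then e else d) := by
  intro fuel
  induction fuel with
  | zero =>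
    intro l acc h
    have : l = [] := List.length_eq_zero_iff.mp (Nat.le_zero.mp h)
    subst this
    simp [PySem.Chars.replace.go]
  | succ n ih =>
    intro l acc h
    cases l with
    | nil => simp [PySem.Chars.replace.go]
    | cons x t =>
      by_cases hx : x = c
      · subst hx
        have hpre : List.isPrefixOf [x] (x :: t) = true := by
          simp [List.isPrefixOf]
        simp only [PySem.Chars.replace.go, hpre, if_pos]
        rw [show List.drop [x].length (x :: t) = t from rfl,
            show [e].reverse ++ acc = e :: acc from rfl]
        rw [ih t (e :: acc) (by simpa using Nat.le_of_succ_le_succ h)]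
        simp
      · have hpre : List.isPrefixOf [c] (x :: t) = false := by
          simp [List.isPrefixOf]
          exact fun hc => (hx hc.symm).elim
        simp only [PySem.Chars.replace.go, hpre, Bool.false_eq_true, if_false]
        rw [ih t (x :: acc) (by simpa using Nat.le_of_succ_le_succ h)]
        simp [hx]

lemma replace_single (t : List Char) (c e : Char) :
    PySem.Chars.replace t [c] [e] = t.map (fun d => if d = c then e else d) := by
  rw [PySem.Chars.replace]
  simp only [List.isEmpty_cons, Bool.false_eq_true, if_false]
  simpa using replace_go_single c e t.length t [] (le_refl _)

-- A's replace loop computes the cleaning map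
lemma cleanA_eq_map : ∀ (cs t : List Char),
    (∀ d ∈ t, PySem.Chars.isalnum d = false → d = ' ' ∨ d ∈ cs) →
    cs.foldl (fun acc c =>
      if !(PySem.Chars.isalnum c) then PySem.Chars.replace acc [c] [' '] else acc) t
      = t.map pvClean := by
  intro cs
  induction cs with
  | nil =>
    intro t hcov
    simp only [List.foldl_nil]
    have hfix : ∀ d ∈ t, pvClean d = id d := by
      intro d hd
      by_cases ha : PySem.Chars.isalnum d = true
      · simp [pvClean, ha]
      · rcases hcov d hd (by simpa using ha) with rfl | h
        · rfl
        · cases h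
    exact ((List.map_congr_left hfix).trans (List.map_id t)).symm
  | cons c cs ih =>
    intro t hcov
    simp only [List.foldl_cons]
    by_cases hc : PySem.Chars.isalnum c = true
    · have hstep : (if !(PySem.Chars.isalnum c) then PySem.Chars.replace t [c] [' '] else t) = t := by
        rw [hc]; rfl
      rw [hstep]
      apply ih
      intro d hd hdna
      rcases hcov d hd hdna with h | h
      · exact Or.inl h
      · rcases List.mem_cons.mp h with rfl | h
        · rw [hc] at hdna; cases hdna
        · exact Or.inr h
    · have hc' : PySem.Chars.isalnum c = false := by simpa using hc
      have hstep : (if !(PySem.Chars.isalnum c) then PySem.Chars.replace t [c] [' '] else t)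
          = t.map (fun d => if d = c then ' ' else d) := by
        rw [hc', replace_single]; rfl
      rw [hstep]
      rw [ih]
      · rw [List.map_map]
        apply List.map_congr_left
        intro d _
        by_cases hdc : d = c
        · subst hdc
          simp [Function.comp, pvClean, hc']
        · simp [Function.comp, hdc]
      · intro d hd hdna
        rcases List.mem_map.mp hd with ⟨e', he', rfl⟩
        by_cases hec : e' = c
        · simp [hec]
        · simp only [hec, if_false] at hdna ⊢
          rcases hcov e' he' hdna with h | h
          · exact Or.inl h
          · rcases List.mem_cons.mp h with rfl | h
            · exact (hec rfl).elim
            · exact Or.inr h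

-- split₀ of a list with a non-space character is nonempty
lemma split0_go_eq_nil : ∀ (l cur : List Char) (acc : List (List Char)),
    PySem.Chars.split₀.go l cur acc = [] →
    acc = [] ∧ cur = [] ∧ ∀ d ∈ l, PySem.Chars.isspace d = true := by
  intro l
  induction l with
  | nil =>
    intro cur acc h
    by_cases hcur : cur = []
    · subst hcur
      simp [PySem.Chars.split₀.go] at h
      simp [h]
    · exfalso
      simp [PySem.Chars.split₀.go, List.isEmpty_iff, hcur] at h
  | cons d l ih =>
    intro cur acc h
    by_cases hd : PySem.Chars.isspace d = true
    · by_cases hcur : cur = []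
      · subst hcur
        simp only [PySem.Chars.split₀.go, hd, if_pos, List.isEmpty_nil] at h
        obtain ⟨h1, h2, h3⟩ := ih [] acc h
        exact ⟨h1, rfl, fun e he => (List.mem_cons.mp he).elim (fun hh => hh ▸ hd) (h3 e)⟩
      · simp only [PySem.Chars.split₀.go, hd, if_pos, List.isEmpty_iff, hcur, if_false] at h
        obtain ⟨h1, _, _⟩ := ih [] (cur.reverse :: acc) h
        cases h1
    · have hd' : PySem.Chars.isspace d = false := by simpa using hd
      simp only [PySem.Chars.split₀.go, hd', Bool.false_eq_true, if_false] at h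
      obtain ⟨h1, h2, h3⟩ := ih (d :: cur) acc h
      cases h2

lemma alnum_not_space (c : Char)
    (h : PySem.Chars.isalnum c = true) : PySem.Chars.isspace c = false := by
  simp only [PySem.Chars.isalnum, PySem.Chars.isalpha, PySem.Chars.isdigit,
    PySem.Chars.isupper, PySem.Chars.islower,
    Bool.or_eq_true, Bool.and_eq_true, decide_eq_true_eq,
    Char.le_def, UInt32.le_iff_toNat_le,
    show ('A').val.toNat = 65 from rfl, show ('Z').val.toNat = 90 from rfl,
    show ('a').val.toNat = 97 from rfl, show ('z').val.toNat = 122 from rfl,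
    show ('0').val.toNat = 48 from rfl, show ('9').val.toNat = 57 from rfl] at h
  rw [Bool.eq_false_iff]
  intro hs
  simp only [PySem.Chars.isspace, Bool.or_eq_true, Bool.and_eq_true, decide_eq_true_eq,
    Char.toNat] at hs
  omega

-- the running first-maximum step shared by both proofs
def pvBest (m w : List Char) : List Char := if w.length > m.length then w else m

lemma loopA_argmax (wl : List (List Char)) : ∀ (u : List (List Char)) (li : Nat),
    li < wl.length → (∀ w ∈ u, w ∈ wl) →
    (u.foldl (fun (li : Nat) w =>
        if w.length > (PySem.List.pyGetD wl (li : Int) []).length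
        then (PySem.List.index? wl w).getD li else li) li) < wl.length ∧
    PySem.List.pyGetD wl ((u.foldl (fun (li : Nat) w =>
        if w.length > (PySem.List.pyGetD wl (li : Int) []).length
        then (PySem.List.index? wl w).getD li else li) li : Nat) : Int) []
      = u.foldl pvBest (PySem.List.pyGetD wl (li : Int) []) := by
  intro u
  induction u with
  | nil => intro li hli _; exact ⟨hli, rfl⟩
  | cons w u ih =>
    intro li hli hmem
    have hw : w ∈ wl := hmem w (List.mem_cons_self ..)
    simp only [List.foldl_cons]
    by_cases hgt : w.length > (PySem.List.pyGetD wl (li : Int) []).length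
    · obtain ⟨j, hj⟩ : ∃ j, PySem.List.index? wl w = some j := by
        cases hidx : PySem.List.index? wl w with
        | none =>
          exfalso
          rw [PySem.List.index?] at hidx
          exact (List.idxOf?_eq_none_iff.mp hidx) hw
        | some j => exact ⟨j, rfl⟩
      obtain ⟨pre, suf, hsplit, hlen, -⟩ := (PySem.List.index?_eq_some_iff wl w j).mp hj
      have hjlt : j < wl.length := by
        rw [hsplit, ← hlen]; simp
      have hjget : PySem.List.pyGetD wl ((j : Nat) : Int) [] = w := by
        rw [PySem.List.pyGetD_of_nonneg wl [] (Int.natCast_nonneg j)]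
        rw [Int.toNat_natCast]
        subst hlen
        subst hsplit
        rw [List.getD_eq_getElem _ _ (by simp)]
        simp
      rw [if_pos hgt, hj]
      simp only [Option.getD_some]
      have hres := ih j hjlt (fun x hx => hmem x (List.mem_cons_of_mem _ hx))
      rw [hjget] at hres
      refine ⟨hres.1, ?_⟩
      rw [hres.2]
      have hb : pvBest (PySem.List.pyGetD wl (li : Int) []) w = w := by
        unfold pvBest; rw [if_pos hgt]
      rw [hb]
    · rw [if_neg hgt]
      have hres := ih li hli (fun x hx => hmem x (List.mem_cons_of_mem _ hx))
      refine ⟨hres.1, ?_⟩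
      rw [hres.2]
      have hb : pvBest (PySem.List.pyGetD wl (li : Int) []) w
          = PySem.List.pyGetD wl (li : Int) [] := by
        unfold pvBest; rw [if_neg hgt]
      rw [hb]

lemma insert_head? (x : List Char) (acc : List (List Char)) :
    (PySem.List.insertBy (fun a b => decide (b.length < a.length)) x acc).head?
      = some (match acc.head? with
              | none => x
              | some y => pvBest y x) := by
  cases acc with
  | nil => rfl
  | cons y ys =>
    by_cases h : y.length < x.length
    · simp [PySem.List.insertBy, h, pvBest, gt_iff_lt]
    · simp [PySem.List.insertBy, h, pvBest, gt_iff_lt]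

lemma foldl_insert_head? : ∀ (xs acc : List (List Char)),
    (xs.foldl (fun acc x => PySem.List.insertBy (fun a b => decide (b.length < a.length)) x acc) acc).head?
      = xs.foldl (fun m x => some (match m with | none => x | some y => pvBest y x)) acc.head? := by
  intro xs
  induction xs with
  | nil => intro acc; rfl
  | cons x xs ih =>
    intro acc
    simp only [List.foldl_cons]
    rw [ih, insert_head?]

lemma foldl_opt_best : ∀ (t : List (List Char)) (m : List Char),
    t.foldl (fun m x => some (match m with | none => x | some y => pvBest y x)) (some m)
      = some (t.foldl pvBest m) := by
  intro t
  induction t with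
  | nil => intro m; rfl
  | cons x t ih =>
    intro m
    simp only [List.foldl_cons]
    exact ih (pvBest m x)

lemma sorted_rev_head (w0 : List Char) (t : List (List Char)) :
    (PySem.List.sorted (w0 :: t) (fun w => w.length) true).headD []
      = t.foldl pvBest w0 := by
  rw [List.headD_eq_head?_getD, PySem.List.sorted_rev_eq_foldl_insertBy,
    List.foldl_cons, foldl_insert_head?]
  have h0 : (PySem.List.insertBy (fun a b => decide (b.length < a.length)) w0 ([] : List (List Char))).head? = some w0 := rfl
  rw [h0, foldl_opt_best]
  rfl

-- ===== VERDICT (by name: the statement is the Claim_ definition above) =====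
theorem longWord_spec : Claim_equal_longWord := by
  intro input_str hdom hpre
  unfold Spec_longWord
  simp only [longWord, longWord_alt]
  have hclean : input_str.toList.foldl (fun acc c =>
      if !(PySem.Chars.isalnum c) then PySem.Chars.replace acc [c] [' '] else acc) input_str.toList
      = input_str.toList.map pvClean :=
    cleanA_eq_map _ _ (fun d hd _ => Or.inr hd)
  have hlam : (fun c => if PySem.Chars.isalnum c then c else ' ') = pvClean := rfl
  rw [hclean, hlam]
  -- the two ports now split the same cleaned character list
  obtain ⟨c, hcmem, hcal⟩ := List.any_eq_true.mp hpre
  have hwlne : PySem.Chars.split₀ (input_str.toList.map pvClean) ≠ [] := by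
    intro hnil
    rw [PySem.Chars.split₀] at hnil
    have hall := (split0_go_eq_nil (input_str.toList.map pvClean) [] [] hnil).2.2
    have hsp := hall (pvClean c) (List.mem_map_of_mem hcmem)
    have hcc : pvClean c = c := by simp [pvClean, hcal]
    rw [hcc, alnum_not_space c hcal] at hsp
    cases hsp
  obtain ⟨w0, t, hwt⟩ := List.exists_cons_of_ne_nil hwlne
  rw [hwt]
  have hA := loopA_argmax (w0 :: t) (w0 :: t) 0 (by simp) (fun w hw => hw)
  have h0 : PySem.List.pyGetD (w0 :: t) ((0 : Nat) : Int) [] = w0 := by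
    rw [PySem.List.pyGetD_of_nonneg (w0 :: t) [] (Int.natCast_nonneg 0)]
    rfl
  rw [h0] at hA
  rw [hA.2]
  have hfirst : (w0 :: t).foldl pvBest w0 = t.foldl pvBest w0 := by
    simp [List.foldl_cons, pvBest]
  rw [hfirst, sorted_rev_head]
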